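-- pv_equiv track=rewrite | github.com/oediaz/REDU2016-13 | redu/src/main/webapp/InferenciasExperto/ComplementoWeb/InfExperto2/lecturaword.py | clasificarPorPorcentaje
-- ===== SOURCE A (Python) =====
-- def clasificarPorPorcentaje(palabra):
--     num=""
--     #Revisa si el argumento es numero , o busca un numero
--     for i in palabra:
--         if i.isdigit():
--             num=num+i
--     #Si existe lo categoriza
--     if num!="":
--         palabra=num
--         if palabra=='0':
--             return 'birads2'
--         else:
--             if int(palabra)<=2:
--                 return 'birads3'
--             else:
--                 if int(palabra)<=10:
--                     return'birads4a'
--                 else: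
--                     if int(palabra)<=50:
--                         return'birads4b'
--                     else:
--                         if int(palabra)<=95:
--                             return 'birads4c'
--                         else:
--                             if int(palabra)<=100:
--                                 return 'birads5'
-- ===== SOURCE B (Python) =====
-- def clasificarPorPorcentaje(palabra):
--     num = "".join(c for c in palabra if c.isdigit())
--     if num == "":
--         return None
--     if num == "0":
--         return 'birads2'
--     n = int(num)
--     bounds = [2, 10, 50, 95, 100]
--     labels = ['birads3', 'birads4a', 'birads4b', 'birads4c', 'birads5']
--     lo, hi = 0, 5
--     while lo < hi:
--         mid = (lo + hi) // 2
--         if bounds[mid] < n: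
--             lo = mid + 1
--         else:
--             hi = mid
--     return labels[lo] if lo < 5 else None
-- ===== Notes on version B (the rewrite author's own statement) =====
-- stated objective: alternative
-- what changed: Replaces the digit-accumulating loop and the five-level nested-if cascade with a filter/join plus a hand-written binary search over a sorted bounds array indexing a parallel labels array, with explicit None returns.
import Mathlib
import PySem

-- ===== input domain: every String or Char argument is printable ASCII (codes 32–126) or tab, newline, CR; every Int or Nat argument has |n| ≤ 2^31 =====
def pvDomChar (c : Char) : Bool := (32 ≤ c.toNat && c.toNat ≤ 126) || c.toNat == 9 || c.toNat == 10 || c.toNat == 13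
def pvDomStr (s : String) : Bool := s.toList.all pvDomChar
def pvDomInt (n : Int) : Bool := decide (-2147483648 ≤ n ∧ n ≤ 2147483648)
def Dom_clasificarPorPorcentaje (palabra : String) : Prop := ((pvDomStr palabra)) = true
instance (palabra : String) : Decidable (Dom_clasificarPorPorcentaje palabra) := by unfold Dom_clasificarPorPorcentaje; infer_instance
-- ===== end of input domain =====

-- B replaces A's digit-accumulating loop and nested-if cascade with a filter/join and a binary search over a (bounds, labels) table; objective: alternative (same cost, different algorithm).


-- ===== PORT A =====
def clasificarPorPorcentaje (palabra : String) : Option String :=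
  -- num = ""; for i in palabra: if i.isdigit(): num = num + i
  let num : List Char := palabra.toList.foldl
    (fun acc c => if PySem.Chars.isdigit c then acc ++ [c] else acc) []
  if num ≠ [] then
    -- palabra = num
    if num = ['0'] then some "birads2"
    else
      match PySem.Int.ofChars? num with  -- int(palabra); always succeeds here (nonempty, all digits)
      | none => none
      | some n =>
        if n ≤ 2 then some "birads3"
        else if n ≤ 10 then some "birads4a"
        else if n ≤ 50 then some "birads4b"
        else if n ≤ 95 then some "birads4c"
        else if n ≤ 100 then some "birads5"
        else none
  else none

-- ===== PORT B =====
-- while lo < hi: mid = (lo+hi)//2; if bounds[mid] < n: lo = mid+1 else: hi = mid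
def pvBsearch (bounds : List Int) (n : Int) (lo hi : Int) : Int :=
  if lo < hi then
    let mid := PySem.Int.floordiv (lo + hi) 2
    if PySem.List.pyGetD bounds mid 0 < n then pvBsearch bounds n (mid + 1) hi
    else pvBsearch bounds n lo mid
  else lo
termination_by (hi - lo).toNat
decreasing_by
  all_goals
    have h2 : PySem.Int.floordiv (lo + hi) 2 = (lo + hi) / 2 :=
      PySem.Int.floordiv_eq_ediv_of_pos (by omega)
    simp only [h2] at *
    omega

def clasificarPorPorcentaje_alt (palabra : String) : Option String :=
  let num : List Char := palabra.toList.filter PySem.Chars.isdigit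
  if num = [] then none
  else if num = ['0'] then some "birads2"
  else
    match PySem.Int.ofChars? num with  -- n = int(num)
    | none => none
    | some n =>
      let bounds : List Int := [2, 10, 50, 95, 100]
      let labels : List String := ["birads3", "birads4a", "birads4b", "birads4c", "birads5"]
      let lo := pvBsearch bounds n 0 5
      if lo < 5 then some (PySem.List.pyGetD labels lo "") else none

-- ===== PRECONDITION & SPEC =====
def Spec_clasificarPorPorcentaje (palabra : String) (out : Option String) : Prop := out = clasificarPorPorcentaje_alt palabra
instance (palabra : String) (out : Option String) : Decidable (Spec_clasificarPorPorcentaje palabra out) := by unfold Spec_clasificarPorPorcentaje; infer_instance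

-- ===== CLAIM =====
def Claim_equal_clasificarPorPorcentaje : Prop := ∀ (palabra : String), Dom_clasificarPorPorcentaje palabra → Spec_clasificarPorPorcentaje palabra (clasificarPorPorcentaje palabra)

-- ===== LEMMAS AND PROOFS =====
theorem pvBsearch_step (bounds : List Int) (n lo hi : Int) (h : lo < hi) :
    pvBsearch bounds n lo hi =
      (if PySem.List.pyGetD bounds (PySem.Int.floordiv (lo + hi) 2) 0 < n
       then pvBsearch bounds n (PySem.Int.floordiv (lo + hi) 2 + 1) hi
       else pvBsearch bounds n lo (PySem.Int.floordiv (lo + hi) 2)) := by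
  rw [pvBsearch]; simp [h]

theorem pvBsearch_done (bounds : List Int) (n lo hi : Int) (h : ¬ lo < hi) :
    pvBsearch bounds n lo hi = lo := by
  rw [pvBsearch]; simp [h]

-- the binary search over [2,10,50,95,100] lands on the same region A's cascade picks
theorem pvBsearch_val (n : Int) :
    pvBsearch [2, 10, 50, 95, 100] n 0 5 =
      if n ≤ 2 then 0 else if n ≤ 10 then 1 else if n ≤ 50 then 2
      else if n ≤ 95 then 3 else if n ≤ 100 then 4 else 5 := by
  have g0 : PySem.List.pyGetD [(2:Int),10,50,95,100] 0 0 = 2 := by decide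
  have g1 : PySem.List.pyGetD [(2:Int),10,50,95,100] 1 0 = 10 := by decide
  have g2 : PySem.List.pyGetD [(2:Int),10,50,95,100] 2 0 = 50 := by decide
  have g3 : PySem.List.pyGetD [(2:Int),10,50,95,100] 3 0 = 95 := by decide
  have g4 : PySem.List.pyGetD [(2:Int),10,50,95,100] 4 0 = 100 := by decide
  have m05 : PySem.Int.floordiv ((0:Int) + 5) 2 = 2 := by decide
  have m02 : PySem.Int.floordiv ((0:Int) + 2) 2 = 1 := by decide
  have m01 : PySem.Int.floordiv ((0:Int) + 1) 2 = 0 := by decide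
  have m35 : PySem.Int.floordiv ((3:Int) + 5) 2 = 4 := by decide
  have m34 : PySem.Int.floordiv ((3:Int) + 4) 2 = 3 := by decide
  by_cases h2 : n ≤ (2:Int)
  · rw [if_pos h2, pvBsearch_step _ _ _ _ (by norm_num)]
    simp only [m05, g2, if_neg (by omega : ¬ (50:Int) < n)]
    rw [pvBsearch_step _ _ _ _ (by norm_num)]
    simp only [m02, g1, if_neg (by omega : ¬ (10:Int) < n)]
    rw [pvBsearch_step _ _ _ _ (by norm_num)]
    simp only [m01, g0, if_neg (by omega : ¬ (2:Int) < n)]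
    rw [pvBsearch_done _ _ _ _ (by norm_num)]; try norm_num
  · rw [if_neg (by omega)]
    by_cases h10 : n ≤ (10:Int)
    · rw [if_pos h10, pvBsearch_step _ _ _ _ (by norm_num)]
      simp only [m05, g2, if_neg (by omega : ¬ (50:Int) < n)]
      rw [pvBsearch_step _ _ _ _ (by norm_num)]
      simp only [m02, g1, if_neg (by omega : ¬ (10:Int) < n)]
      rw [pvBsearch_step _ _ _ _ (by norm_num)]
      simp only [m01, g0, if_pos (by omega : (2:Int) < n)]
      rw [pvBsearch_done _ _ _ _ (by norm_num)]; try norm_num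
    · rw [if_neg (by omega)]
      by_cases h50 : n ≤ (50:Int)
      · rw [if_pos h50, pvBsearch_step _ _ _ _ (by norm_num)]
        simp only [m05, g2, if_neg (by omega : ¬ (50:Int) < n)]
        rw [pvBsearch_step _ _ _ _ (by norm_num)]
        simp only [m02, g1, if_pos (by omega : (10:Int) < n)]
        norm_num
        rw [pvBsearch_done _ _ _ _ (by norm_num)]; try norm_num
      · rw [if_neg (by omega)]
        by_cases h95 : n ≤ (95:Int)
        · rw [if_pos h95, pvBsearch_step _ _ _ _ (by norm_num)]
          simp only [m05, g2, if_pos (by omega : (50:Int) < n)]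
          norm_num
          rw [pvBsearch_step _ _ _ _ (by norm_num)]
          simp only [m35, g4, if_neg (by omega : ¬ (100:Int) < n)]
          rw [pvBsearch_step _ _ _ _ (by norm_num)]
          simp only [m34, g3, if_neg (by omega : ¬ (95:Int) < n)]
          rw [pvBsearch_done _ _ _ _ (by norm_num)]; try norm_num
        · rw [if_neg (by omega)]
          by_cases h100 : n ≤ (100:Int)
          · rw [if_pos h100, pvBsearch_step _ _ _ _ (by norm_num)]
            simp only [m05, g2, if_pos (by omega : (50:Int) < n)]
            norm_num
            rw [pvBsearch_step _ _ _ _ (by norm_num)]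
            simp only [m35, g4, if_neg (by omega : ¬ (100:Int) < n)]
            rw [pvBsearch_step _ _ _ _ (by norm_num)]
            simp only [m34, g3, if_pos (by omega : (95:Int) < n)]
            norm_num
            rw [pvBsearch_done _ _ _ _ (by norm_num)]; try norm_num
          · rw [if_neg (by omega), pvBsearch_step _ _ _ _ (by norm_num)]
            simp only [m05, g2, if_pos (by omega : (50:Int) < n)]
            norm_num
            rw [pvBsearch_step _ _ _ _ (by norm_num)]
            simp only [m35, g4, if_pos (by omega : (100:Int) < n)]
            norm_num
            rw [pvBsearch_done _ _ _ _ (by norm_num)]; try norm_num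

-- ===== VERDICT =====
theorem clasificarPorPorcentaje_spec : Claim_equal_clasificarPorPorcentaje := by
  intro palabra _
  unfold Spec_clasificarPorPorcentaje clasificarPorPorcentaje clasificarPorPorcentaje_alt
  simp only [PySem.List.foldl_append_if_eq_filter, List.nil_append, ne_eq, ite_not]
  set num := palabra.toList.filter PySem.Chars.isdigit with hnum
  by_cases h0 : num = []
  · simp [h0]
  · by_cases h1 : num = ['0']
    · simp [h1]
    · simp only [h0, h1, if_false]
      cases PySem.Int.ofChars? num with
      | none => rfl
      | some n =>
        simp only [pvBsearch_val]
        by_cases h2 : n ≤ 2 <;> by_cases h10 : n ≤ 10 <;> by_cases h50 : n ≤ 50 <;>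
          by_cases h95 : n ≤ 95 <;> by_cases h100 : n ≤ 100 <;>
          simp only [h2, h10, h50, h95, h100, if_true, if_false] <;>
          first | omega | decide
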